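-- pv_equiv track=rewrite | github.com/Wulfic/Cicada3301 | tools/liber_primus_solver.py | generate_frequency_key
-- ===== SOURCE A (Python) =====
-- from collections import Counter
--
-- LETTERS = [
--     "F", "U", "TH", "O", "R", "C", "G", "W", "H", "N", "I", "J", "EO", "P", "X",
--     "S", "T", "B", "E", "M", "L", "NG", "OE", "D", "A", "AE", "Y", "IA", "EA"
-- ]
--
-- def generate_frequency_key(cipher_indices, key_length, target_letter='E'):
--     """
--     Generate initial key assuming most common cipher symbol in each coset
--     decrypts to the target letter (default 'E', index 18).
--
--     For SUB: plaintext = (cipher - key) mod 29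
--     So: key = (cipher - plaintext) mod 29
--     """
--     target_idx = LETTERS.index(target_letter) if target_letter in LETTERS else 18
--     key = []
--
--     for i in range(key_length):
--         # Get all cipher symbols at this position mod key_length
--         coset = [cipher_indices[j] for j in range(i, len(cipher_indices), key_length)]
--
--         if not coset:
--             key.append(0)
--             continue
--
--         # Find most common symbol in coset
--         most_common = Counter(coset).most_common(1)[0][0]
--
--         # Calculate key value
--         key_val = (most_common - target_idx) % 29
--         key.append(key_val)
--
--     return key
-- ===== SOURCE B (Python) =====
-- from collections import Counter
--
-- LETTERS = [
--     "F", "U", "TH", "O", "R", "C", "G", "W", "H", "N", "I", "J", "EO", "P", "X",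
--     "S", "T", "B", "E", "M", "L", "NG", "OE", "D", "A", "AE", "Y", "IA", "EA"
-- ]
--
-- def generate_frequency_key(cipher_indices, key_length, target_letter='E'):
--     """One pass over the ciphertext: bucket counts per key position, then read
--     off each coset's most common symbol."""
--     target_idx = LETTERS.index(target_letter) if target_letter in LETTERS else 18
--     if key_length <= 0:
--         return []
--     buckets = [Counter() for _ in range(key_length)]
--     for j, sym in enumerate(cipher_indices):
--         buckets[j % key_length][sym] += 1
--     return [0 if not b else (b.most_common(1)[0][0] - target_idx) % 29
--             for b in buckets]
-- ===== Notes on version B (the rewrite author's own statement) =====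
-- stated objective: alternative
-- what changed: A builds each coset with a separate strided indexing pass over the ciphertext (one pass per key position) and builds a Counter per coset; B makes a single enumerate pass over the ciphertext, bucketing counts into one Counter per key position (j % key_length), then reads the key off the buckets.
import Mathlib
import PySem

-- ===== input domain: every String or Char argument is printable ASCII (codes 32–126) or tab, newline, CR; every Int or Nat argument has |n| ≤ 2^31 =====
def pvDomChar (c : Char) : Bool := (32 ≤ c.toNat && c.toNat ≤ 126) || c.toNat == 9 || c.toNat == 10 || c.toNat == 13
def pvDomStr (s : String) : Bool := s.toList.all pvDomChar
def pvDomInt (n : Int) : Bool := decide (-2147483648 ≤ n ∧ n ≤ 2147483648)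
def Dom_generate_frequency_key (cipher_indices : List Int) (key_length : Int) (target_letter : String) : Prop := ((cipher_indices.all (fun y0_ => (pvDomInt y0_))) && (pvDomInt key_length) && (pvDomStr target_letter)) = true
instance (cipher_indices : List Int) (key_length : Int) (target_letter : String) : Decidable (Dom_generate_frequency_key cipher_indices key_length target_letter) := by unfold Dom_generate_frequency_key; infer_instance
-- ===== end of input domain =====

-- B replaces A's per-position strided passes (one coset list + Counter per key position)
-- by a single enumerate pass that buckets counts per key position; objective: alternative.

-- module constant LETTERS (shared context of both programs)
def pvLETTERS : List String :=
  ["F", "U", "TH", "O", "R", "C", "G", "W", "H", "N", "I", "J", "EO", "P", "X",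
   "S", "T", "B", "E", "M", "L", "NG", "OE", "D", "A", "AE", "Y", "IA", "EA"]

-- Counter(...).most_common(1)[0][0]: first key of the items sorted stably by count descending
-- (CPython's nlargest on ties keeps insertion order, = sorted(key=count, reverse=True)[0]).
-- Only applied to non-empty counters; 0 is an unreachable default.
def pvMostCommon1 (d : PySem.Dict Int Int) : Int :=
  match PySem.List.sorted d.items (fun p => p.2) true with
  | [] => 0
  | p :: _ => p.1

-- ===== PORT A =====
def generate_frequency_key (cipher_indices : List Int) (key_length : Int) (target_letter : String) : List Int :=
  let target_idx : Int :=
    if pvLETTERS.contains target_letter then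
      (((PySem.List.index? pvLETTERS target_letter).getD 0 : Nat) : Int)
    else 18
  (PySem.List.pyRange 0 key_length 1).foldl (fun key i =>
    let coset := (PySem.List.pyRange i (PySem.List.len cipher_indices) key_length).map
      (fun j => PySem.List.pyGetD cipher_indices j 0)
    if coset = [] then
      key ++ [0]
    else
      key ++ [PySem.Int.mod (pvMostCommon1 (PySem.Dict.counter coset) - target_idx) 29]) []

-- ===== PORT B =====
-- buckets[j % key_length][sym] += 1
def pvStep (key_length : Int) (bs : List (PySem.Dict Int Int)) (p : Int × Int) : List (PySem.Dict Int Int) :=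
  bs.modify (PySem.Int.mod p.1 key_length).toNat (fun d => d.modify p.2 0 (· + 1))

def generate_frequency_key_alt (cipher_indices : List Int) (key_length : Int) (target_letter : String) : List Int :=
  let target_idx : Int :=
    if pvLETTERS.contains target_letter then
      (((PySem.List.index? pvLETTERS target_letter).getD 0 : Nat) : Int)
    else 18
  if key_length ≤ 0 then []
  else
    let buckets0 : List (PySem.Dict Int Int) :=
      (PySem.List.pyRange 0 key_length 1).map (fun _ => PySem.Dict.empty)
    let buckets := (PySem.List.enumerate cipher_indices 0).foldl (pvStep key_length) buckets0
    buckets.map (fun b =>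
      if b.items = [] then 0
      else PySem.Int.mod (pvMostCommon1 b - target_idx) 29)

-- ===== PRECONDITION & SPEC =====
def Spec_generate_frequency_key (cipher_indices : List Int) (key_length : Int) (target_letter : String) (out : List Int) : Prop := out = generate_frequency_key_alt cipher_indices key_length target_letter
instance (cipher_indices : List Int) (key_length : Int) (target_letter : String) (out : List Int) : Decidable (Spec_generate_frequency_key cipher_indices key_length target_letter out) := by unfold Spec_generate_frequency_key; infer_instance

-- ===== CLAIM (what is proved, stated in full; the proofs are below) =====
def Claim_equal_generate_frequency_key : Prop := ∀ (cipher_indices : List Int) (key_length : Int) (target_letter : String), Dom_generate_frequency_key cipher_indices key_length target_letter → Spec_generate_frequency_key cipher_indices key_length target_letter (generate_frequency_key cipher_indices key_length target_letter)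

-- ===== LEMMAS AND PROOFS =====

theorem length_foldl_pvStep (k : Int) (ps : List (Int × Int)) (bs : List (PySem.Dict Int Int)) :
    (ps.foldl (pvStep k) bs).length = bs.length := by
  induction ps generalizing bs with
  | nil => rfl
  | cons p ps ih => simp [List.foldl_cons, ih, pvStep, List.length_modify]

-- The bucket at position i after the single pass is the counting fold over exactly
-- the pairs whose index falls in coset i.
theorem getElem_foldl_pvStep (k : Int) (ps : List (Int × Int)) (bs : List (PySem.Dict Int Int))
    (i : Nat) (hi : i < bs.length) (h2 : i < (ps.foldl (pvStep k) bs).length) :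
    (ps.foldl (pvStep k) bs)[i]'h2 =
      ((ps.filter (fun p => (PySem.Int.mod p.1 k).toNat == i)).map Prod.snd).foldl
        (fun d x => d.modify x 0 (· + 1)) (bs[i]'hi) := by
  induction ps generalizing bs with
  | nil => simp
  | cons p ps ih =>
    have hlen : i < (pvStep k bs p).length := by simpa [pvStep, List.length_modify] using hi
    simp only [List.foldl_cons]
    rw [ih (pvStep k bs p) hlen]
    by_cases hc : (PySem.Int.mod p.1 k).toNat = i
    · have hget : (pvStep k bs p)[i]'hlen = (bs[i]'hi).modify p.2 0 (· + 1) := by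
        simp [pvStep, hc]
      simp [hc, hget]
    · have hget : (pvStep k bs p)[i]'hlen = bs[i]'hi := by
        simp [pvStep, hc]
      simp [hc, hget]

theorem ofList_eq_nil_iff {α : Type} [BEq α] [LawfulBEq α] (xs : List α) :
    PySem.Set.ofList xs = [] ↔ xs = [] := by
  constructor
  · intro h
    cases xs with
    | nil => rfl
    | cons x l =>
      exact absurd h (List.ne_nil_of_mem ((PySem.Set.mem_ofList (x :: l) x).mpr (by simp)))
  · intro h; subst h; rfl

theorem counter_items_eq_nil_iff (xs : List Int) :
    (PySem.Dict.counter xs).items = [] ↔ xs = [] := by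
  rw [PySem.Dict.items_counter, List.map_eq_nil_iff, ofList_eq_nil_iff]

-- the strided range is the filter of the full index range by residue
theorem pyRange_stride_eq_filter (k : Int) (hk : 0 < k) (n : Int) (i : Nat) (hik : (i : Int) < k) :
    PySem.List.pyRange (i : Int) n k =
      (PySem.List.pyRange 0 n 1).filter (fun j => (PySem.Int.mod j k).toNat == i) := by
  have hmod : ∀ x : Int, 0 ≤ x → ((PySem.Int.mod x k).toNat = i ↔ ((i : Int) ≤ x ∧ k ∣ x - (i : Int))) := by
    intro x hx
    rw [PySem.Int.mod_eq_emod_of_pos hk]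
    have h0 : 0 ≤ x % k := Int.emod_nonneg x (by omega)
    have h1 : x % k < k := Int.emod_lt_of_pos x hk
    constructor
    · intro h
      have hxi : x % k = (i : Int) := by omega
      have hdvd : k ∣ x - x % k := by
        rw [Int.emod_def]; ring_nf; exact Dvd.intro _ rfl
      refine ⟨?_, by rwa [hxi] at hdvd⟩
      by_cases hkx : k ≤ x
      · omega
      · have : x % k = x := Int.emod_eq_of_lt hx (by omega)
        omega
    · rintro ⟨hle, hdvd⟩
      have : (i : Int) ≡ x [ZMOD k] := Int.modEq_iff_dvd.mpr hdvd
      have hix : (i : Int) % k = x % k := this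
      have : (i : Int) % k = (i : Int) := Int.emod_eq_of_lt (by omega) hik
      omega
  have hsortL : (PySem.List.pyRange (i : Int) n k).Pairwise (· < ·) := by
    rw [PySem.List.pyRange_of_pos _ _ hk]
    refine List.Pairwise.map _ ?_ List.pairwise_lt_range
    intro a b hab
    have : (a : Int) < b := by exact_mod_cast hab
    nlinarith
  have hsortR : ((PySem.List.pyRange 0 n 1).filter (fun j => (PySem.Int.mod j k).toNat == i)).Pairwise (· < ·) :=
    List.Pairwise.filter _ (PySem.List.pairwise_lt_pyRange_one 0 n)
  have hperm : (PySem.List.pyRange (i : Int) n k).Perm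
      ((PySem.List.pyRange 0 n 1).filter (fun j => (PySem.Int.mod j k).toNat == i)) := by
    refine (List.perm_ext_iff_of_nodup (hsortL.imp ne_of_lt) (hsortR.imp ne_of_lt)).mpr ?_
    intro x
    rw [List.mem_filter, PySem.List.mem_pyRange_iff_of_pos hk, PySem.List.mem_pyRange_one]
    constructor
    · rintro ⟨h1, h2, h3⟩
      refine ⟨⟨by omega, h2⟩, ?_⟩
      simpa using (hmod x (by omega)).mpr ⟨h1, h3⟩
    · rintro ⟨⟨h0, h2⟩, h3⟩
      have := (hmod x h0).mp (by simpa using h3)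
      exact ⟨this.1, h2, this.2⟩
  exact List.Perm.eq_of_pairwise (fun a b _ _ h1 h2 => absurd h2 (asymm h1)) hsortL hsortR hperm

-- A's coset i equals the values of the enumerate pairs whose index has residue i
theorem coset_eq_filter_enumerate (ci : List Int) (k : Int) (hk : 0 < k) (i : Nat) (hik : (i : Int) < k) :
    (PySem.List.pyRange (i : Int) (PySem.List.len ci) k).map (fun j => PySem.List.pyGetD ci j 0) =
      ((PySem.List.enumerate ci 0).filter (fun p => (PySem.Int.mod p.1 k).toNat == i)).map Prod.snd := by
  rw [PySem.List.enumerate_eq_map_pyRange ci 0, List.filter_map, List.map_map,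
      pyRange_stride_eq_filter k hk (PySem.List.len ci) i hik]
  rfl

theorem generate_frequency_key_spec : Claim_equal_generate_frequency_key := by
  intro ci kl tl _
  unfold Spec_generate_frequency_key generate_frequency_key generate_frequency_key_alt
  set t : Int :=
    if pvLETTERS.contains tl then
      (((PySem.List.index? pvLETTERS tl).getD 0 : Nat) : Int)
    else 18 with ht
  by_cases hkl : kl ≤ 0
  · simp [hkl, PySem.List.pyRange_one_eq_nil hkl]
  · have hk : 0 < kl := by omega
    simp only [hkl, if_false]
    -- A as a map over the positions
    have hA : ∀ (acc : List Int),
        (PySem.List.pyRange 0 kl 1).foldl (fun key i =>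
          let coset := (PySem.List.pyRange i (PySem.List.len ci) kl).map
            (fun j => PySem.List.pyGetD ci j 0)
          if coset = [] then key ++ [0]
          else key ++ [PySem.Int.mod (pvMostCommon1 (PySem.Dict.counter coset) - t) 29]) acc
        = acc ++ (PySem.List.pyRange 0 kl 1).map (fun i =>
            let coset := (PySem.List.pyRange i (PySem.List.len ci) kl).map
              (fun j => PySem.List.pyGetD ci j 0)
            if coset = [] then 0
            else PySem.Int.mod (pvMostCommon1 (PySem.Dict.counter coset) - t) 29) := by
      intro acc
      rw [show (fun (key : List Int) (i : Int) =>
          let coset := (PySem.List.pyRange i (PySem.List.len ci) kl).map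
            (fun j => PySem.List.pyGetD ci j 0)
          if coset = [] then key ++ [0]
          else key ++ [PySem.Int.mod (pvMostCommon1 (PySem.Dict.counter coset) - t) 29]) =
        (fun (key : List Int) (i : Int) => key ++ [
          let coset := (PySem.List.pyRange i (PySem.List.len ci) kl).map
            (fun j => PySem.List.pyGetD ci j 0)
          if coset = [] then 0
          else PySem.Int.mod (pvMostCommon1 (PySem.Dict.counter coset) - t) 29]) from ?_]
      · exact PySem.List.foldl_append_singleton_eq_map _ _ acc
      · funext key i
        simp only
        split <;> rfl
    rw [hA, List.nil_append]
    -- now compare the two maps elementwise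
    have hlen0 : ((PySem.List.pyRange 0 kl 1).map
        (fun _ => (PySem.Dict.empty : PySem.Dict Int Int))).length = (kl - 0).toNat := by
      simp [PySem.List.length_pyRange_one]
    apply List.ext_getElem
    · simp [length_foldl_pvStep, PySem.List.length_pyRange_one]
    · intro j hj1 hj2
      have hjlt : j < (kl - 0).toNat := by
        simpa [PySem.List.length_pyRange_one] using hj1
      have hjk : (j : Int) < kl := by omega
      have hbj : j < (((PySem.List.pyRange 0 kl 1).map
          (fun _ => (PySem.Dict.empty : PySem.Dict Int Int)))).length := by omega
      -- the bucket at j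
      have hbucket :
          ((PySem.List.enumerate ci 0).foldl (pvStep kl)
            ((PySem.List.pyRange 0 kl 1).map (fun _ => PySem.Dict.empty)))[j]'(by
              simpa [length_foldl_pvStep] using hbj) =
          PySem.Dict.counter
            ((PySem.List.pyRange (j : Int) (PySem.List.len ci) kl).map
              (fun x => PySem.List.pyGetD ci x 0)) := by
        have hinit : (((PySem.List.pyRange 0 kl 1).map
            (fun _ => (PySem.Dict.empty : PySem.Dict Int Int)))[j]'hbj) = PySem.Dict.empty :=
          List.getElem_map _
        rw [getElem_foldl_pvStep kl _ _ j hbj]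
        rw [hinit, coset_eq_filter_enumerate ci kl hk j hjk]
        rw [PySem.Dict.counter_eq_foldl, List.foldl_map]
      simp only [List.getElem_map]
      rw [hbucket]
      have hcoset : (PySem.List.pyRange 0 kl 1)[j]'(by simpa [PySem.List.length_pyRange_one] using hjlt) = (j : Int) := by
        simpa using PySem.List.getElem_pyRange_one 0 kl j (by simpa [PySem.List.length_pyRange_one] using hjlt)
      rw [hcoset]
      by_cases hnil : (PySem.List.pyRange (j : Int) (PySem.List.len ci) kl).map
          (fun x => PySem.List.pyGetD ci x 0) = []
      · rw [if_pos hnil, if_pos ((counter_items_eq_nil_iff _).mpr hnil)]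
      · rw [if_neg hnil, if_neg (fun h => hnil ((counter_items_eq_nil_iff _).mp h))]
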